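-- pv_equiv track=rewrite | github.com/Andrew-C-Peterson/Project-Euler-Andrew | PE054.py | Score_4k_FH
-- ===== SOURCE A (Python) =====
-- def Score_4k_FH(hand):
--     #This function checks for 4 of a kind or full house
--     #These both require having 2 different valued cards in the hand
--     #For 4 of a kind, the first tie breaker is the value of 4 cards
--     #The second tie breaker is the value of the other card
--     #For full house, the first tie breaker is the value of the 3 cards
--     #Second tie breaker is the value of the 2 cards
--
--     #If it's neither of these, return 0
--     score = []
--     nums = []
--     for j in range(0,5):
--         nums.append(hand[j][0])
--     vals = set(nums)
--
--     if len(vals) == 2: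
--         vals = list(vals)
--         count = [0,0]
--         for num in nums:
--             if num ==vals[0]:
--                 count[0]+=1
--             elif num == vals[1]:
--                 count[1]+=1
--
--         if max(count) == 3:
--             score.append(6)
--             score.append(vals[count.index(3)])
--             score.append(vals[count.index(2)])
--         elif max(count)==4:
--             score.append(7)
--             score.append(vals[count.index(4)])
--             score.append(vals[count.index(1)])
--     else:
--         score.append(0)
--     return score
-- ===== SOURCE B (Python) =====
-- def Score_4k_FH(hand):
--     # Sort the five ranks and judge the multiplicity pattern positionally:
--     # no counting at all, just equality tests between sorted positions.
--     s = sorted(hand[j][0] for j in range(5))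
--     a, b, c, d, e = s
--     if a == e:
--         return [0]                      # all five equal: one distinct value
--     if a == d:
--         return [7, a, e]                # a a a a | e
--     if b == e:
--         return [7, b, a]                # a | b b b b
--     if a == c and d == e:
--         return [6, a, d]                # a a a | d d
--     if a == b and c == e:
--         return [6, c, a]                # a a | c c c
--     return [0]                          # three or more distinct values
-- ===== Notes on version B (the rewrite author's own statement) =====
-- stated objective: alternative
-- what changed: Replaces A's set/two-slot tally with .index lookups by sorting the five ranks and reading the multiplicity pattern from positional equalities in the sorted list (a==d, b==e, a==c&&d==e, a==b&&c==e), so no frequency counting happens at all.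
import Mathlib
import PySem

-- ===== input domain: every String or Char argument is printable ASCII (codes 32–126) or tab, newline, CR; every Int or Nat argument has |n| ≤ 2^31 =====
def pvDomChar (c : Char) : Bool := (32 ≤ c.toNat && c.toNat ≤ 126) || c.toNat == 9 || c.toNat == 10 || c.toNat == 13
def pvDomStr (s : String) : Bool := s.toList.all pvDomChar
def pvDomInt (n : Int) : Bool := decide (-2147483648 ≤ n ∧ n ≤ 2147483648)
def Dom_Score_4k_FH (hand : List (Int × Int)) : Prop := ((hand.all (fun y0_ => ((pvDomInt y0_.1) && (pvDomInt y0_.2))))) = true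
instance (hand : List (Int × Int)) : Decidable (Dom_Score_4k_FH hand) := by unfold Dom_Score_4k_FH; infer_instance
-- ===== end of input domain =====

-- B sorts the five ranks and reads the multiplicity pattern from positional
-- equalities in the sorted list; no frequency counting (objective: alternative).

-- ===== PORT A =====
-- vals[count.index(t)]: the `else 0` arm is where Python would raise ValueError (unreachable under Pre_)
def pickVal (valsL : List Int) (count : Int × Int) (t : Int) : Int :=
  if count.1 == t then PySem.List.pyGetD valsL 0 0
  else if count.2 == t then PySem.List.pyGetD valsL 1 0
  else 0

-- A's body after nums is built; count is Python's two-slot list [0,0], kept as a pair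
def scoreFromNums (nums : List Int) : List Int :=
  let vals : PySem.Set Int := PySem.Set.ofList nums
  if PySem.Set.len vals == 2 then
    let valsL : List Int := vals
    let count : Int × Int := nums.foldl (fun c num =>
      if num == PySem.List.pyGetD valsL 0 0 then (c.1 + 1, c.2)
      else if num == PySem.List.pyGetD valsL 1 0 then (c.1, c.2 + 1)
      else c) (0, 0)
    if max count.1 count.2 == 3 then
      [6, pickVal valsL count 3, pickVal valsL count 2]
    else if max count.1 count.2 == 4 then
      [7, pickVal valsL count 4, pickVal valsL count 1]
    else []
  else [0]

def Score_4k_FH (hand : List (Int × Int)) : List Int :=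
  -- nums: for j in range(0,5): nums.append(hand[j][0]); `none` = IndexError on a short hand, excluded by Pre_
  scoreFromNums ((PySem.List.pyRange 0 5 1).foldl (fun acc j =>
    match PySem.List.pyGet? hand j with
    | some card => acc ++ [card.1]
    | none => acc) [])

-- ===== PORT B =====
-- positional pattern of the sorted five ranks; `| _ => [0]` is unreachable (the list has 5 elements)
def scoreFromSorted (s : List Int) : List Int :=
  match s with
  | [a, b, c, d, e] =>
    if a == e then [0]
    else if a == d then [7, a, e]
    else if b == e then [7, b, a]
    else if a == c && d == e then [6, a, d]
    else if a == b && c == e then [6, c, a]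
    else [0]
  | _ => [0]

def Score_4k_FH_alt (hand : List (Int × Int)) : List Int :=
  -- s = sorted(hand[j][0] for j in range(5)); `none` = IndexError, excluded by Pre_
  scoreFromSorted (PySem.List.sorted ((PySem.List.pyRange 0 5 1).foldl (fun acc j =>
    match PySem.List.pyGet? hand j with
    | some card => acc ++ [card.1]
    | none => acc) []) (fun x => x) false)

-- ===== PRECONDITION & SPEC =====
-- Pre_: A indexes hand[0]..hand[4], so it raises IndexError on hands shorter than 5 cards.
def Pre_Score_4k_FH (hand : List (Int × Int)) : Prop := 5 ≤ hand.length
instance (hand : List (Int × Int)) : Decidable (Pre_Score_4k_FH hand) := by unfold Pre_Score_4k_FH; infer_instance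
def pvWitness_Score_4k_FH : (List (Int × Int)) := [(2, 0), (2, 1), (2, 2), (3, 3), (3, 0)]

def Spec_Score_4k_FH (hand : List (Int × Int)) (out : List Int) : Prop := out = Score_4k_FH_alt hand
instance (hand : List (Int × Int)) (out : List Int) : Decidable (Spec_Score_4k_FH hand out) := by unfold Spec_Score_4k_FH; infer_instance

-- ===== CLAIM (what is proved, stated in full; the proofs are below) =====
def Claim_equal_Score_4k_FH : Prop := ∀ (hand : List (Int × Int)), Dom_Score_4k_FH hand → Pre_Score_4k_FH hand → Spec_Score_4k_FH hand (Score_4k_FH hand)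

-- ===== LEMMAS AND PROOFS =====

-- A's tally loop computes the occurrence counts of k0 and k1 when every element is one of them
lemma countfold (k0 k1 : Int) (hne : k0 ≠ k1) :
    ∀ (ns : List Int) (acc : Int × Int), (∀ v ∈ ns, v = k0 ∨ v = k1) →
    ns.foldl (fun c num =>
      if num == k0 then (c.1 + 1, c.2)
      else if num == k1 then (c.1, c.2 + 1)
      else c) acc
    = (acc.1 + ns.count k0, acc.2 + ns.count k1) := by
  intro ns
  induction ns with
  | nil => intro acc _; simp
  | cons v t ih =>
    intro acc h
    rcases h v (List.mem_cons_self) with rfl | rfl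
    · rw [List.foldl_cons]
      simp only [BEq.rfl, if_true]
      rw [ih _ (fun w hw => h w (List.mem_cons_of_mem _ hw))]
      have e0 : List.count v (v :: t) = List.count v t + 1 := by simp
      have e1 : List.count k1 (v :: t) = List.count k1 t := by
        simp [hne]
      rw [e0, e1]
      simp only [Prod.mk.injEq]
      constructor <;> (push_cast; try ring)
    · rw [List.foldl_cons]
      have hvk0 : (v == k0) = false := by simp; exact fun hh => hne hh.symm
      simp only [hvk0, BEq.rfl, if_true]
      rw [ih _ (fun w hw => h w (List.mem_cons_of_mem _ hw))]
      have e0 : List.count k0 (v :: t) = List.count k0 t := by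
        simp [List.count_cons]; exact fun hh => hne hh.symm
      have e1 : List.count v (v :: t) = List.count v t + 1 := by simp
      rw [e0, e1]
      simp only [Prod.mk.injEq]
      constructor <;> (push_cast; try ring)

-- when every element of ns is k0 or k1, the two counts exhaust ns
lemma count_two_len (k0 k1 : Int) (hne : k0 ≠ k1) (ns : List Int)
    (h : ∀ v ∈ ns, v = k0 ∨ v = k1) :
    ns.count k0 + ns.count k1 = ns.length := by
  induction ns with
  | nil => simp
  | cons v t ih =>
    have ht := ih (fun w hw => h w (List.mem_cons_of_mem _ hw))
    rcases h v (List.mem_cons_self) with rfl | rfl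
    · have e1 : List.count k1 (v :: t) = List.count k1 t := by
        simp [hne]
      simp [e1]; omega
    · have e0 : List.count k0 (v :: t) = List.count k0 t := by
        simp [List.count_cons]; exact fun hh => hne hh.symm
      simp [e0]; omega

-- a two-valued list is a permutation of the two blocks of its counts
lemma perm_replicate (k0 k1 : Int) (hne : k0 ≠ k1) (ns : List Int)
    (hmem : ∀ v ∈ ns, v = k0 ∨ v = k1) :
    (List.replicate (ns.count k0) k0 ++ List.replicate (ns.count k1) k1).Perm ns := by
  rw [List.perm_iff_count]
  intro a
  by_cases h0 : a = k0
  · subst h0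
    simp [List.count_append, List.count_replicate]
    intro h; exact absurd h.symm hne
  · by_cases h1 : a = k1
    · subst h1
      simp [List.count_append, List.count_replicate]
      intro h; exact absurd h hne
    · have hnm : a ∉ ns := fun hin => by rcases hmem a hin with rfl | rfl <;> simp_all
      have e0 : (a == k0) = false := by simp [h0]
      have e1 : (a == k1) = false := by simp [h1]
      simp [List.count_append, List.count_replicate, e0, e1, List.count_eq_zero_of_not_mem hnm]
      exact ⟨fun h => absurd h.symm h0, fun h => absurd h.symm h1⟩

-- the block list is nondecreasing when k0 ≤ k1
lemma pairwise_replicate_le (k0 k1 : Int) (hle : k0 ≤ k1) (n0 n1 : Nat) :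
    (List.replicate n0 k0 ++ List.replicate n1 k1).Pairwise (fun a b => a ≤ b) := by
  rw [List.pairwise_append]
  refine ⟨List.pairwise_replicate_of_refl, List.pairwise_replicate_of_refl, ?_⟩
  intro a ha b hb
  rw [List.eq_of_mem_replicate ha, List.eq_of_mem_replicate hb]
  exact hle

-- a list with all members among two values has at most 2 distinct values
lemma distinct_le_two (x y : Int) (ns : List Int)
    (hmem : ∀ v ∈ ns, v = x ∨ v = y) :
    (PySem.Set.ofList ns : List Int).length ≤ 2 := by
  have hsub : (PySem.Set.ofList ns : List Int) ⊆ [x, y] := by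
    intro v hv
    rcases hmem v ((PySem.Set.mem_ofList ns v).mp hv) with rfl | rfl <;> simp
  have := (List.subperm_of_subset (PySem.Set.nodup_ofList ns) hsub).length_le
  simpa using this

-- the core equivalence: for a 5-element nums list, A's scoring equals B's scoring of the sorted list
lemma core (ns : List Int) (hlen : ns.length = 5) :
    scoreFromNums ns = scoreFromSorted (PySem.List.sorted ns (fun x => x) false) := by
  by_cases h2 : (PySem.Set.ofList ns : List Int).length = 2
  · obtain ⟨k0, k1, hs⟩ := List.length_eq_two.mp h2
    have hne : k0 ≠ k1 := by
      have := PySem.Set.nodup_ofList ns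
      rw [hs] at this
      simp at this; exact this
    have hmem : ∀ v ∈ ns, v = k0 ∨ v = k1 := by
      intro v hv
      have : v ∈ PySem.Set.ofList ns := (PySem.Set.mem_ofList ns v).mpr hv
      rw [hs] at this; simpa using this
    have hk0 : k0 ∈ ns := (PySem.Set.mem_ofList ns k0).mp (by rw [hs]; simp)
    have hk1 : k1 ∈ ns := (PySem.Set.mem_ofList ns k1).mp (by rw [hs]; simp)
    have hn0 : 1 ≤ ns.count k0 := List.count_pos_iff.mpr hk0
    have hn1 : 1 ≤ ns.count k1 := List.count_pos_iff.mpr hk1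
    have hsum : ns.count k0 + ns.count k1 = 5 := by
      rw [count_two_len k0 k1 hne ns hmem, hlen]
    have hperm := perm_replicate k0 k1 hne ns hmem
    -- A's side: reduce the tally loop to the two counts
    unfold scoreFromNums
    have hg0 : PySem.List.pyGetD [k0, k1] 0 0 = k0 := by simp [pysem]
    have hg1 : PySem.List.pyGetD [k0, k1] 1 0 = k1 := by simp [pysem]
    simp only [PySem.Set.len, hs, List.length_cons, List.length_nil, hg0, hg1]
    rw [countfold k0 k1 hne ns (0, 0) hmem]
    have hne' : k1 ≠ k0 := hne.symm
    obtain ⟨n0, hc0⟩ : ∃ n, List.count k0 ns = n := ⟨_, rfl⟩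
    obtain ⟨n1, hc1⟩ : ∃ n, List.count k1 ns = n := ⟨_, rfl⟩
    rw [hc0, hc1] at hperm ⊢
    rw [hc0] at hsum hn0
    rw [hc1] at hsum hn1
    -- B's side: name the sorted list as the two nondecreasing blocks
    rcases lt_or_gt_of_ne hne with hlt | hgt
    · have hsorted : PySem.List.sorted ns (fun x => x) false
          = List.replicate n0 k0 ++ List.replicate n1 k1 :=
        PySem.List.sorted_id_eq_of_perm_of_pairwise ns _ hperm
          (pairwise_replicate_le k0 k1 hlt.le n0 n1)
      rw [hsorted]
      have hb : n0 ≤ 4 := by omega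
      interval_cases n0 <;>
        [ (have hn1' : n1 = 4 := by omega);
          (have hn1' : n1 = 3 := by omega);
          (have hn1' : n1 = 2 := by omega);
          (have hn1' : n1 = 1 := by omega)] <;>
        subst hn1' <;>
        simp [pickVal, scoreFromSorted, List.replicate, hne, hg0, hg1]
    · have hperm' : (List.replicate n1 k1 ++ List.replicate n0 k0).Perm ns :=
        List.perm_append_comm.trans hperm
      have hsorted : PySem.List.sorted ns (fun x => x) false
          = List.replicate n1 k1 ++ List.replicate n0 k0 :=
        PySem.List.sorted_id_eq_of_perm_of_pairwise ns _ hperm'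
          (pairwise_replicate_le k1 k0 hgt.le n1 n0)
      rw [hsorted]
      have hb : n0 ≤ 4 := by omega
      interval_cases n0 <;>
        [ (have hn1' : n1 = 4 := by omega);
          (have hn1' : n1 = 3 := by omega);
          (have hn1' : n1 = 2 := by omega);
          (have hn1' : n1 = 1 := by omega)] <;>
        subst hn1' <;>
        simp [pickVal, scoreFromSorted, List.replicate, hne', hg0, hg1]
  · -- not exactly two distinct values: both sides return [0]
    have hApos : scoreFromNums ns = [0] := by
      unfold scoreFromNums
      have hc : (PySem.Set.len (PySem.Set.ofList ns) == 2) = false := by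
        simp [PySem.Set.len]
        intro hq
        exact absurd (by exact_mod_cast hq) h2
      simp
      intro hq
      exact absurd (by exact_mod_cast hq) h2
    rw [hApos]
    have hnil : ns ≠ [] := by intro h; rw [h] at hlen; simp at hlen
    have hLpos : 1 ≤ (PySem.Set.ofList ns : List Int).length := by
      obtain ⟨v, hv⟩ := List.exists_mem_of_ne_nil ns hnil
      have : v ∈ (PySem.Set.ofList ns : List Int) := (PySem.Set.mem_ofList ns v).mpr hv
      exact List.length_pos_of_mem this
    by_cases hL1 : (PySem.Set.ofList ns : List Int).length = 1
    · -- one distinct value: ns is five copies of it, sorted; first test fires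
      obtain ⟨k, hsk⟩ := List.length_eq_one_iff.mp hL1
      have hall : ∀ v ∈ ns, v = k := by
        intro v hv
        have : v ∈ PySem.Set.ofList ns := (PySem.Set.mem_ofList ns v).mpr hv
        rw [hsk] at this; simpa using this
      have hrep : ns = List.replicate 5 k := by
        rw [List.eq_replicate_iff]; exact ⟨hlen, hall⟩
      have hp : List.Pairwise (fun x y : Int => (fun v => v) x ≤ (fun v => v) y)
          (List.replicate 5 k) := by
        rw [List.pairwise_iff_forall_sublist]
        intro x y hsub
        have hx : x = k := List.eq_of_mem_replicate (hsub.subset (List.mem_cons_self))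
        have hy : y = k := List.eq_of_mem_replicate
          (hsub.subset (List.mem_cons_of_mem _ List.mem_cons_self))
        rw [hx, hy]
      rw [hrep, PySem.List.sorted_eq_self_of_pairwise (List.replicate 5 k) (fun v => v) hp]
      simp [List.replicate, scoreFromSorted]
    · -- at least three distinct values: no positional pattern can hold
      have hL3 : 3 ≤ (PySem.Set.ofList ns : List Int).length := by omega
      have hslen : (PySem.List.sorted ns (fun x => x) false).length = 5 := by
        rw [PySem.List.length_sorted, hlen]
      obtain ⟨a, b, c, d, e, hse⟩ : ∃ a b c d e,
          PySem.List.sorted ns (fun x => x) false = [a, b, c, d, e] := by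
        match hsm : PySem.List.sorted ns (fun x => x) false, hslen with
        | [a, b, c, d, e], _ => exact ⟨a, b, c, d, e, rfl⟩
      have hchain := PySem.List.sorted_pairwise ns (fun x => x)
      rw [hse] at hchain
      simp only [List.pairwise_cons, List.mem_cons, List.not_mem_nil, or_false,
        forall_eq_or_imp, forall_eq, List.Pairwise.nil, and_true] at hchain
      obtain ⟨⟨hab, hac, had, hae⟩, ⟨hbc, hbd, hbe⟩, ⟨hcd, hce⟩, hde⟩ := hchain
      have hmemS : ∀ v ∈ ns, v = a ∨ v = b ∨ v = c ∨ v = d ∨ v = e := by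
        intro v hv
        have : v ∈ PySem.List.sorted ns (fun x => x) false :=
          (PySem.List.mem_sorted ns (fun x => x) false v).mpr hv
        rw [hse] at this; simpa using this
      have key : ∀ x y : Int, (∀ v ∈ ns, v = x ∨ v = y) → False := by
        intro x y h
        have := distinct_le_two x y ns h
        omega
      have h1 : ¬ a = e := fun h => key a a (fun v hv => by
        rcases hmemS v hv with rfl | rfl | rfl | rfl | rfl <;> omega)
      have h2 : ¬ a = d := fun h => key a e (fun v hv => by
        rcases hmemS v hv with rfl | rfl | rfl | rfl | rfl <;> omega)
      have h3 : ¬ b = e := fun h => key a b (fun v hv => by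
        rcases hmemS v hv with rfl | rfl | rfl | rfl | rfl <;> omega)
      have h4 : ¬ (a = c ∧ d = e) := fun ⟨hh1, hh2⟩ => key a d (fun v hv => by
        rcases hmemS v hv with rfl | rfl | rfl | rfl | rfl <;> omega)
      have h5 : ¬ (a = b ∧ c = e) := fun ⟨hh1, hh2⟩ => key a c (fun v hv => by
        rcases hmemS v hv with rfl | rfl | rfl | rfl | rfl <;> omega)
      rw [hse]
      simp only [scoreFromSorted]
      have b1 : (a == e) = false := by simp [h1]
      have b2 : (a == d) = false := by simp [h2]
      have b3 : (b == e) = false := by simp [h3]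
      have b4 : (a == c && (d == e)) = false := by
        simp only [Bool.and_eq_false_iff, beq_eq_false_iff_ne, ne_eq]
        by_cases hac' : a = c
        · exact Or.inr (fun hh => h4 ⟨hac', hh⟩)
        · exact Or.inl hac'
      have b5 : (a == b && (c == e)) = false := by
        simp only [Bool.and_eq_false_iff, beq_eq_false_iff_ne, ne_eq]
        by_cases hab' : a = b
        · exact Or.inr (fun hh => h5 ⟨hab', hh⟩)
        · exact Or.inl hab'
      rw [b1, b2, b3, b4, b5]
      simp
    

-- hand[0] .. hand[4] on a ≥5-card hand
lemma gets (p1 p2 p3 p4 p5 : Int × Int) (rest : List (Int × Int)) :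
    PySem.List.pyGet? (p1::p2::p3::p4::p5::rest) 0 = some p1 ∧
    PySem.List.pyGet? (p1::p2::p3::p4::p5::rest) 1 = some p2 ∧
    PySem.List.pyGet? (p1::p2::p3::p4::p5::rest) 2 = some p3 ∧
    PySem.List.pyGet? (p1::p2::p3::p4::p5::rest) 3 = some p4 ∧
    PySem.List.pyGet? (p1::p2::p3::p4::p5::rest) 4 = some p5 := by
  refine ⟨?_, ?_, ?_, ?_, ?_⟩ <;>
    simp [PySem.List.pyGet?, PySem.List.pyIdx?] <;>
    (rw [if_pos (by omega)]; simp)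

-- evaluating the two index loops on a ≥5-card hand
lemma loops (p1 p2 p3 p4 p5 : Int × Int) (rest : List (Int × Int)) :
    Score_4k_FH (p1::p2::p3::p4::p5::rest) = scoreFromNums [p1.1, p2.1, p3.1, p4.1, p5.1]
    ∧ Score_4k_FH_alt (p1::p2::p3::p4::p5::rest)
      = scoreFromSorted (PySem.List.sorted [p1.1, p2.1, p3.1, p4.1, p5.1] (fun x => x) false) := by
  obtain ⟨h0, h1, h2, h3, h4⟩ := gets p1 p2 p3 p4 p5 rest
  have hr : PySem.List.pyRange 0 5 1 = [0, 1, 2, 3, 4] := by decide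
  constructor
  · simp only [Score_4k_FH, hr, List.foldl_cons, List.foldl_nil, h0, h1, h2, h3, h4]
    simp
  · simp only [Score_4k_FH_alt, hr, List.foldl_cons, List.foldl_nil, h0, h1, h2, h3, h4]
    simp

-- ===== VERDICT (by name: the statement is the Claim_ definition above) =====
theorem Score_4k_FH_spec : Claim_equal_Score_4k_FH := by
  intro hand _ hpre
  unfold Spec_Score_4k_FH
  match hand, hpre with
  | p1::p2::p3::p4::p5::rest, _ =>
    obtain ⟨hA, hB⟩ := loops p1 p2 p3 p4 p5 rest
    rw [hA, hB, core _ (by simp)]
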